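-- pv_equiv track=rewrite | github.com/jun9100/moviepilot-subtitle-agent | app/service.py | _requires_chinese_subtitle
-- ===== SOURCE A (Python) =====
-- def _requires_chinese_subtitle(requested_languages: list[str]) -> bool:
--     normalized = {item.strip().lower() for item in requested_languages if item and item.strip()}
--     if not normalized:
--         return True
--
--     chinese_aliases = {
--         "zh",
--         "zh-cn",
--         "zh-tw",
--         "zh-hans",
--         "zh-hant",
--         "chs",
--         "cht",
--         "chi",
--         "zho",
--     }
--     return any(item in chinese_aliases for item in normalized)
-- ===== SOURCE B (Python) =====
-- _CHINESE_ALIASES = ("zh", "zh-cn", "zh-tw", "zh-hans", "zh-hant",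
--                     "chs", "cht", "chi", "zho")
--
--
-- def _requires_chinese_subtitle(requested_languages: list[str]) -> bool:
--     # Loop order swapped vs the set-membership formulation: for each known
--     # alias, scan the request list for an item normalizing to exactly it.
--     for alias in _CHINESE_ALIASES:
--         for item in requested_languages:
--             if item and item.strip() and item.strip().lower() == alias:
--                 return True
--     # No Chinese alias requested: True only when nothing valid was requested.
--     return all(not (item and item.strip()) for item in requested_languages)
-- ===== Notes on version B (the rewrite author's own statement) =====
-- stated objective: alternative
-- what changed: Loops are swapped: instead of building a normalized set and testing membership in an alias set, B iterates over the 9 aliases in the outer loop and compares each item's normalized form by string equality, with a separate all() pass for the empty/all-blank fallback.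
import Mathlib
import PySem

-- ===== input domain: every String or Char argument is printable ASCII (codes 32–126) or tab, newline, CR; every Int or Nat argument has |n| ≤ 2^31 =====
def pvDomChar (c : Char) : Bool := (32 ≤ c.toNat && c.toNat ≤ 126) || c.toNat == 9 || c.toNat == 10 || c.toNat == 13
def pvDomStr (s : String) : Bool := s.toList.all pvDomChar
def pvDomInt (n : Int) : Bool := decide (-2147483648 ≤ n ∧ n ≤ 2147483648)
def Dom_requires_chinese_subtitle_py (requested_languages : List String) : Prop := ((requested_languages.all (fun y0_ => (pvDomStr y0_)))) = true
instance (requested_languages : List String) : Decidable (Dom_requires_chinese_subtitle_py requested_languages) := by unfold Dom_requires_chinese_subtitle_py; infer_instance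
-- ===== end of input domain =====

-- B swaps the loops: outer loop over the 9 alias strings, inner equality scan over the
-- requested items (no set, no membership test), plus a separate all() fallback pass;
-- objective: alternative (same O(n) cost, different traversal).


-- ===== PORT A =====
def pvAliases : PySem.Set String :=
  PySem.Set.ofList ["zh", "zh-cn", "zh-tw", "zh-hans", "zh-hant", "chs", "cht", "chi", "zho"]

def requires_chinese_subtitle_py (requested_languages : List String) : Bool :=
  -- normalized = {item.strip().lower() for item in requested_languages if item and item.strip()}
  let normalized : PySem.Set String :=
    PySem.Set.ofList
      ((requested_languages.filter
          (fun item => !(item == "") && !(PySem.Str.strip item == ""))).map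
        (fun item => PySem.Str.lower (PySem.Str.strip item)))
  if normalized = [] then true
  else
    -- any(item in chinese_aliases for item in normalized): membership test, order-independent
    normalized.any (fun item => PySem.Set.contains pvAliases item)

-- ===== PORT B =====
-- _CHINESE_ALIASES, a tuple iterated in order
def pvAliasList : List String :=
  ["zh", "zh-cn", "zh-tw", "zh-hans", "zh-hant", "chs", "cht", "chi", "zho"]

def requires_chinese_subtitle_py_alt (requested_languages : List String) : Bool :=
  -- for alias in _CHINESE_ALIASES: for item in requested_languages: if … == alias: return True
  if pvAliasList.any (fun al =>
      requested_languages.any (fun item =>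
        !(item == "") && !(PySem.Str.strip item == "") &&
          (PySem.Str.lower (PySem.Str.strip item) == al))) then true
  else
    -- return all(not (item and item.strip()) for item in requested_languages)
    requested_languages.all (fun item => !(!(item == "") && !(PySem.Str.strip item == "")))

-- ===== PRECONDITION & SPEC =====
def Spec_requires_chinese_subtitle_py (requested_languages : List String) (out : Bool) : Prop := out = requires_chinese_subtitle_py_alt requested_languages
instance (requested_languages : List String) (out : Bool) : Decidable (Spec_requires_chinese_subtitle_py requested_languages out) := by unfold Spec_requires_chinese_subtitle_py; infer_instance

-- ===== CLAIM (what is proved, stated in full; the proofs are below) =====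
def Claim_equal_requires_chinese_subtitle_py : Prop := ∀ (requested_languages : List String), Dom_requires_chinese_subtitle_py requested_languages → Spec_requires_chinese_subtitle_py requested_languages (requires_chinese_subtitle_py requested_languages)

-- ===== LEMMAS AND PROOFS =====

-- the normalized stream A materializes (as a plain list, before dedup)
def rcsNorm (xs : List String) : List String :=
  (xs.filter (fun item => !(item == "") && !(PySem.Str.strip item == ""))).map
    (fun item => PySem.Str.lower (PySem.Str.strip item))

-- B's inner scan equals an equality scan over the normalized list
lemma rcs_inner_eq (a : String) (xs : List String) :
    xs.any (fun item =>
        !(item == "") && !(PySem.Str.strip item == "") &&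
          (PySem.Str.lower (PySem.Str.strip item) == a))
      = (rcsNorm xs).any (fun s => s == a) := by
  induction xs with
  | nil => rfl
  | cons x xs ih =>
    by_cases hx : x == "" <;> by_cases hs : PySem.Str.strip x == "" <;>
      simp [rcsNorm, hx, hs, List.any_cons] at *

-- B's fallback pass decides emptiness of the normalized list
lemma rcs_all_invalid (xs : List String) :
    xs.all (fun item => !(!(item == "") && !(PySem.Str.strip item == "")))
      = decide (rcsNorm xs = []) := by
  induction xs with
  | nil => rfl
  | cons x xs ih =>
    by_cases hx : x == "" <;> by_cases hs : PySem.Str.strip x == "" <;>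
      simp [rcsNorm, hx, hs, List.all_cons] at * <;> simp [ih]

-- loop swap: ∃ alias with a matching item ↔ ∃ normalized item in the alias list
lemma rcs_swap (norm aliases : List String) :
    aliases.any (fun a => norm.any (fun s => s == a))
      = norm.any (fun s => aliases.contains s) := by
  apply Bool.eq_iff_iff.mpr
  simp only [List.any_eq_true, beq_iff_eq, List.contains_iff_mem]
  constructor
  · rintro ⟨a, ha, s, hs, rfl⟩; exact ⟨s, hs, ha⟩
  · rintro ⟨s, hs, ha⟩; exact ⟨s, ha, s, hs, rfl⟩

-- any over the deduplicated set equals any over the underlying list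
lemma any_ofList (xs : List String) (p : String → Bool) :
    (PySem.Set.ofList xs).any p = xs.any p := by
  apply Bool.eq_iff_iff.mpr
  simp only [List.any_eq_true]
  constructor
  · rintro ⟨a, ha, hp⟩; exact ⟨a, (PySem.Set.mem_ofList xs a).1 ha, hp⟩
  · rintro ⟨a, ha, hp⟩; exact ⟨a, (PySem.Set.mem_ofList xs a).2 ha, hp⟩

lemma ofList_eq_nil_iff (xs : List String) : (PySem.Set.ofList xs = []) ↔ xs = [] := by
  constructor
  · intro h
    cases xs with
    | nil => rfl
    | cons a as =>
      exfalso
      have : a ∈ PySem.Set.ofList (a :: as) := (PySem.Set.mem_ofList _ a).2 (by simp)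
      simp [h] at this
  · rintro rfl; rfl
-- ===== VERDICT (by name: the statement is the Claim_ definition above) =====
theorem requires_chinese_subtitle_py_spec : Claim_equal_requires_chinese_subtitle_py := by
  intro xs _
  show requires_chinese_subtitle_py xs = requires_chinese_subtitle_py_alt xs
  unfold requires_chinese_subtitle_py requires_chinese_subtitle_py_alt
  have hnorm : ((xs.filter
      (fun item => !(item == "") && !(PySem.Str.strip item == ""))).map
      (fun item => PySem.Str.lower (PySem.Str.strip item))) = rcsNorm xs := rfl
  simp only [hnorm]
  have hB : pvAliasList.any (fun al =>
      xs.any (fun item =>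
        !(item == "") && !(PySem.Str.strip item == "") &&
          (PySem.Str.lower (PySem.Str.strip item) == al)))
      = (rcsNorm xs).any (fun s => pvAliasList.contains s) := by
    calc pvAliasList.any (fun al =>
          xs.any (fun item =>
            !(item == "") && !(PySem.Str.strip item == "") &&
              (PySem.Str.lower (PySem.Str.strip item) == al)))
        = pvAliasList.any (fun a => (rcsNorm xs).any (fun s => s == a)) := by
          simp only [rcs_inner_eq]
      _ = (rcsNorm xs).any (fun s => pvAliasList.contains s) := rcs_swap _ _
  rw [hB, rcs_all_invalid]
  have hA : (PySem.Set.ofList (rcsNorm xs)).any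
      (fun item => PySem.Set.contains pvAliases item)
      = (rcsNorm xs).any (fun s => pvAliasList.contains s) := by
    rw [any_ofList]; rfl
  by_cases h0 : rcsNorm xs = []
  · rw [h0]; simp
  · rw [if_neg (fun hc => h0 ((ofList_eq_nil_iff _).1 hc)), hA]
    by_cases hany : (rcsNorm xs).any (fun s => pvAliasList.contains s)
    · rw [if_pos hany, hany]
    · rw [if_neg hany]
      rw [Bool.not_eq_true] at hany
      rw [hany]
      simp [h0]
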